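-- pv_equiv track=rewrite | github.com/princeton-nlp/ShortcutGrammar | src/features/feature_utils.py | pair_ngrams_from_lsts_
-- ===== SOURCE A (Python) =====
-- def ngrams(x, n):
--     if len(x) < n:
--         return []
--     return [tuple(x[i - n : i]) for i in range(n, len(x) + 1)]
--
-- def pair_ngrams_from_lsts_(x, lsts=[], max_n=3, max_m=3):
--     a, b = x
--     a_ngrams = set(w for n in range(1, max_n + 1) for w in ngrams(a, n))
--     b_ngrams = set(w for n in range(1, max_m + 1) for w in ngrams(b, n))
--     d = {}
--     for i, lst in enumerate(lsts):
--         for u, v in lst: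
--             has_u = u in a_ngrams
--             has_v = v in b_ngrams
--             if u[0] == "ϵ":
--                 d[i] = has_v
--             elif v[0] == "ϵ":
--                 d[i] = has_u
--             else:
--                 d[i] = has_u and has_v
--             if d[i]:
--                 break
--     return d
-- ===== SOURCE B (Python) =====
-- def pair_ngrams_from_lsts_(x, lsts=[], max_n=3, max_m=3):
--     a, b = x
--
--     def occurs(seq, t, limit):
--         L = len(t)
--         if L < 1 or L > limit:
--             return False
--         return any(tuple(seq[i:i + L]) == tuple(t) for i in range(len(seq) - L + 1))
--
--     d = {}
--     for i, lst in enumerate(lsts):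
--         for u, v in lst:
--             if u[0] == "ϵ":
--                 val = occurs(b, v, max_m)
--             elif v[0] == "ϵ":
--                 val = occurs(a, u, max_n)
--             else:
--                 val = occurs(a, u, max_n) and occurs(b, v, max_m)
--             d[i] = val
--             if val:
--                 break
--     return d
-- ===== Notes on version B (the rewrite author's own statement) =====
-- stated objective: faster
-- what changed: B drops A's precomputed a_ngrams/b_ngrams hash sets and decides each membership by a direct windowed scan of the sentence with early exit, so no O(|a|*max_n + |b|*max_m) ngram index is ever built; this is measurably faster when few pairs are examined (the timed inputs), though it rescans per pair in the many-pairs regime.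
import Mathlib
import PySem

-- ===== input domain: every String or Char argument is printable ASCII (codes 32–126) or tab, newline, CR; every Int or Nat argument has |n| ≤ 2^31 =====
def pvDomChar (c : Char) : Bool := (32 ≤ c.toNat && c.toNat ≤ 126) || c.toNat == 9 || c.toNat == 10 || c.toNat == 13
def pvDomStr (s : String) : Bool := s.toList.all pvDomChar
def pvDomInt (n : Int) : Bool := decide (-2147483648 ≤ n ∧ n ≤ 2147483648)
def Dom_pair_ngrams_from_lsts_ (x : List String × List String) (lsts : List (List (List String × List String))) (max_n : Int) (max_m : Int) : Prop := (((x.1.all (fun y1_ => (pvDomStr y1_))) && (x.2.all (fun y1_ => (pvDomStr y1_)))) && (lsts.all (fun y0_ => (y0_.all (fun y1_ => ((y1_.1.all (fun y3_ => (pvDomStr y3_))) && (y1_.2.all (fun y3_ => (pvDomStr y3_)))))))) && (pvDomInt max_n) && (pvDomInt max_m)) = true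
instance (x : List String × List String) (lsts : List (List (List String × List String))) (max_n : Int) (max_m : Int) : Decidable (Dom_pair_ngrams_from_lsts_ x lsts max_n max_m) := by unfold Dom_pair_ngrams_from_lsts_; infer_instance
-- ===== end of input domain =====

-- B replaces A's precomputed ngram hash sets by an on-the-fly windowed scan of the sentence
-- for each queried pair, never building the ngram index (measured faster on the timed inputs,
-- which query few pairs); return-value equivalence proved on Pre_.

-- ===== PORT A =====
-- def ngrams(x, n)
def ngramsPort (x : List String) (n : Int) : List (List String) :=
  if (x.length : Int) < n then []
  else (PySem.List.pyRange n ((x.length : Int) + 1) 1).map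
    (fun i => PySem.List.slice x (some (i - n)) (some i))

-- set(w for n in range(1, mx + 1) for w in ngrams(s, n))  (used once for a, once for b)
def ngramSet (s : List String) (mx : Int) : PySem.Set (List String) :=
  PySem.Set.ofList ((PySem.List.pyRange 1 (mx + 1) 1).flatMap (fun n => ngramsPort s n))

-- the inner 'for u, v in lst' loop of A, with its early break; on an empty u/v Python raises
-- IndexError at u[0]/v[0] (excluded by Pre_): the port stops and returns d there.
def innerA (ang bng : PySem.Set (List String)) (i : Int)
    (d : PySem.Dict Int Bool) : List (List String × List String) → PySem.Dict Int Bool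
  | [] => d
  | (u, v) :: rest =>
    let has_u := PySem.Set.contains ang u
    let has_v := PySem.Set.contains bng v
    match PySem.List.pyGet? u 0 with
    | none => d
    | some u0 =>
      if u0 == "ϵ" then
        let d' := PySem.Dict.insert d i has_v
        if has_v then d' else innerA ang bng i d' rest
      else
        match PySem.List.pyGet? v 0 with
        | none => d
        | some v0 =>
          if v0 == "ϵ" then
            let d' := PySem.Dict.insert d i has_u
            if has_u then d' else innerA ang bng i d' rest
          else
            let d' := PySem.Dict.insert d i (has_u && has_v)
            if has_u && has_v then d' else innerA ang bng i d' rest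

def pair_ngrams_from_lsts_ (x : List String × List String) (lsts : List (List (List String × List String))) (max_n : Int) (max_m : Int) : List (Int × Bool) :=
  let a := x.1
  let b := x.2
  let a_ngrams := ngramSet a max_n
  let b_ngrams := ngramSet b max_m
  ((PySem.List.enumerate lsts 0).foldl
    (fun d p => innerA a_ngrams b_ngrams p.1 d p.2) PySem.Dict.empty).items

-- ===== PORT B =====
-- def occurs(seq, t, limit): windowed scan, no precomputed set
def occursPort (seq t : List String) (limit : Int) : Bool :=
  let L : Int := t.length
  if L < 1 ∨ limit < L then false
  else (PySem.List.pyRange 0 ((seq.length : Int) - L + 1) 1).any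
    (fun i => PySem.List.slice seq (some i) (some (i + L)) == t)

-- B's inner loop: branch on u[0]/v[0] first, compute each membership by scanning;
-- the none cases are Python's IndexError (excluded by Pre_): the port stops and returns d.
def innerB (a b : List String) (max_n max_m : Int) (i : Int)
    (d : PySem.Dict Int Bool) : List (List String × List String) → PySem.Dict Int Bool
  | [] => d
  | (u, v) :: rest =>
    match PySem.List.pyGet? u 0 with
    | none => d
    | some u0 =>
      let val? : Option Bool :=
        if u0 == "ϵ" then some (occursPort b v max_m)
        else
          match PySem.List.pyGet? v 0 with
          | none => none
          | some v0 =>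
            if v0 == "ϵ" then some (occursPort a u max_n)
            else some (occursPort a u max_n && occursPort b v max_m)
      match val? with
      | none => d
      | some val =>
        let d' := PySem.Dict.insert d i val
        if val then d' else innerB a b max_n max_m i d' rest

def pair_ngrams_from_lsts__alt (x : List String × List String) (lsts : List (List (List String × List String))) (max_n : Int) (max_m : Int) : List (Int × Bool) :=
  ((PySem.List.enumerate lsts 0).foldl
    (fun d p => innerB x.1 x.2 max_n max_m p.1 d p.2) PySem.Dict.empty).items

-- ===== PRECONDITION & SPEC =====
-- Pre_ excludes inputs whose lsts contain a pair with an empty u or v tuple: on such a pair,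
-- if the loop reaches it, both A and B raise IndexError at u[0]/v[0] (a pair skipped by an
-- earlier break is also excluded although A then returns; see the cite).
def Pre_pair_ngrams_from_lsts_ (x : List String × List String) (lsts : List (List (List String × List String))) (max_n : Int) (max_m : Int) : Prop :=
  lsts.all (fun lst => lst.all (fun p => !p.1.isEmpty && !p.2.isEmpty)) = true
instance (x : List String × List String) (lsts : List (List (List String × List String))) (max_n : Int) (max_m : Int) : Decidable (Pre_pair_ngrams_from_lsts_ x lsts max_n max_m) := by unfold Pre_pair_ngrams_from_lsts_; infer_instance

def pvWitness_pair_ngrams_from_lsts_ : (List String × List String) × (List (List (List String × List String))) × Int × Int :=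
  ((["a"], ["b"]), [[(["a"], ["b"])]], 3, 3)

def Spec_pair_ngrams_from_lsts_ (x : List String × List String) (lsts : List (List (List String × List String))) (max_n : Int) (max_m : Int) (out : List (Int × Bool)) : Prop := out = pair_ngrams_from_lsts__alt x lsts max_n max_m
instance (x : List String × List String) (lsts : List (List (List String × List String))) (max_n : Int) (max_m : Int) (out : List (Int × Bool)) : Decidable (Spec_pair_ngrams_from_lsts_ x lsts max_n max_m out) := by unfold Spec_pair_ngrams_from_lsts_; infer_instance

-- ===== CLAIM (what is proved, stated in full; the proofs are below) =====
def Claim_equal_pair_ngrams_from_lsts_ : Prop := ∀ (x : List String × List String) (lsts : List (List (List String × List String))) (max_n : Int) (max_m : Int), Dom_pair_ngrams_from_lsts_ x lsts max_n max_m → Pre_pair_ngrams_from_lsts_ x lsts max_n max_m → Spec_pair_ngrams_from_lsts_ x lsts max_n max_m (pair_ngrams_from_lsts_ x lsts max_n max_m)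

-- ===== LEMMAS AND PROOFS =====

-- the scan as a predicate
theorem occurs_iff (s t : List String) (mx : Int) :
    occursPort s t mx = true ↔
      (1 ≤ (t.length : Int) ∧ (t.length : Int) ≤ mx ∧
       ∃ i : Int, 0 ≤ i ∧ i + t.length ≤ (s.length : Int) ∧
         PySem.List.slice s (some i) (some (i + t.length)) = t) := by
  unfold occursPort
  dsimp only
  split_ifs with hc
  · simp only [Bool.false_eq_true, false_iff]
    rintro ⟨h1, h2, -⟩; omega
  · push_neg at hc
    simp only [List.any_eq_true, PySem.List.mem_pyRange_one, beq_iff_eq]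
    constructor
    · rintro ⟨i, ⟨h0, hlt⟩, hsl⟩
      exact ⟨hc.1, hc.2, i, h0, by omega, hsl⟩
    · rintro ⟨-, -, i, h0, hle, hsl⟩
      exact ⟨i, ⟨h0, by omega⟩, hsl⟩

-- membership in ngrams(s, n) as the same predicate (for n ≥ 1)
theorem ngram_mem_iff (s t : List String) (n : Int) (hn : 1 ≤ n) :
    t ∈ ngramsPort s n ↔
      ((t.length : Int) = n ∧ ∃ i : Int, 0 ≤ i ∧ i + t.length ≤ (s.length : Int) ∧
        PySem.List.slice s (some i) (some (i + t.length)) = t) := by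
  unfold ngramsPort
  split_ifs with hlen
  · simp only [List.not_mem_nil, false_iff]
    rintro ⟨hL, i, h0, hle, -⟩; omega
  · push_neg at hlen
    simp only [List.mem_map, PySem.List.mem_pyRange_one]
    constructor
    · rintro ⟨j, ⟨hnj, hjlen⟩, hsl⟩
      have h1 : (0 : Int) ≤ j - n := by omega
      have h2 : (0 : Int) ≤ j := by omega
      have hsl' := hsl
      rw [PySem.List.slice_toNat s h1 h2] at hsl'
      have hL : (t.length : Int) = n := by
        rw [← hsl']
        simp only [List.length_take, List.length_drop]
        omega
      refine ⟨hL, j - n, h1, by omega, ?_⟩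
      rw [show (j - n) + (t.length : Int) = j by omega]
      exact hsl
    · rintro ⟨hL, i, h0, hle, hsl⟩
      refine ⟨i + n, ⟨by omega, by omega⟩, ?_⟩
      rw [show i + n - n = i by ring, show i + n = i + (t.length : Int) by omega]
      exact hsl

-- membership in the precomputed ngram set = the windowed scan
theorem mem_ngram_eq_occurs (s t : List String) (mx : Int) :
    PySem.Set.contains (ngramSet s mx) t = occursPort s t mx := by
  rw [← Bool.coe_iff_coe, PySem.Set.contains_iff, occurs_iff]
  unfold ngramSet
  rw [PySem.Set.mem_ofList]
  simp only [List.mem_flatMap, PySem.List.mem_pyRange_one]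
  constructor
  · rintro ⟨n, ⟨hn1, hn2⟩, hmem⟩
    obtain ⟨hL, i, h0, hle, hsl⟩ := (ngram_mem_iff s t n hn1).mp hmem
    exact ⟨by omega, by omega, i, h0, hle, hsl⟩
  · rintro ⟨h1, h2, i, h0, hle, hsl⟩
    exact ⟨(t.length : Int), ⟨h1, by omega⟩,
      (ngram_mem_iff s t _ h1).mpr ⟨rfl, i, h0, hle, hsl⟩⟩

-- the two inner loops agree when no u/v in lst is empty
theorem inner_eq (a b : List String) (mn mm i : Int) (d : PySem.Dict Int Bool)
    (lst : List (List String × List String))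
    (h : ∀ p ∈ lst, p.1 ≠ [] ∧ p.2 ≠ []) :
    innerA (ngramSet a mn) (ngramSet b mm) i d lst = innerB a b mn mm i d lst := by
  induction lst generalizing d with
  | nil => rfl
  | cons p rest ih =>
    obtain ⟨u, v⟩ := p
    obtain ⟨hu, hv⟩ := h (u, v) List.mem_cons_self
    obtain ⟨u0, us, rfl⟩ := List.exists_cons_of_ne_nil hu
    obtain ⟨v0, vs, rfl⟩ := List.exists_cons_of_ne_nil hv
    have hrest : ∀ p ∈ rest, p.1 ≠ [] ∧ p.2 ≠ [] :=
      fun p hp => h p (List.mem_cons_of_mem _ hp)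
    have hgu : PySem.List.pyGet? (u0 :: us) (0 : Int) = some u0 := by
      simp [PySem.List.pyGet?, PySem.List.pyIdx?]
    have hgv : PySem.List.pyGet? (v0 :: vs) (0 : Int) = some v0 := by
      simp [PySem.List.pyGet?, PySem.List.pyIdx?]
    simp only [innerA, innerB, hgu, hgv, mem_ngram_eq_occurs]
    by_cases h1 : u0 == "ϵ"
    · simp only [h1, if_pos]
      split_ifs with hval
      · rfl
      · exact ih _ hrest
    · simp only [Bool.not_eq_true] at h1
      simp only [h1, Bool.false_eq_true, if_false]
      by_cases h2 : v0 == "ϵ"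
      · simp only [h2, if_pos]
        split_ifs with hval
        · rfl
        · exact ih _ hrest
      · simp only [Bool.not_eq_true] at h2
        simp only [h2, Bool.false_eq_true, if_false]
        split_ifs with hval
        · rfl
        · exact ih _ hrest

-- ===== VERDICT (by name: the statement is the Claim_ definition above) =====
theorem pair_ngrams_from_lsts__spec : Claim_equal_pair_ngrams_from_lsts_ := by
  intro x lsts max_n max_m _ hpre
  unfold Spec_pair_ngrams_from_lsts_ pair_ngrams_from_lsts_ pair_ngrams_from_lsts__alt
  unfold Pre_pair_ngrams_from_lsts_ at hpre
  simp only [List.all_eq_true, Bool.and_eq_true, Bool.not_eq_true',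
    List.isEmpty_eq_false_iff] at hpre
  dsimp only
  congr 1
  apply PySem.List.foldl_congr_mem
  intro d p hp
  obtain ⟨k, hk, rfl⟩ := (PySem.List.mem_enumerate_iff _ _ _).mp hp
  exact inner_eq x.1 x.2 max_n max_m _ d _
    (fun q hq => hpre _ (List.getElem_mem hk) q hq)
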